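-- pv_equiv track=rewrite | github.com/leeiopd/algorithm | 2022/python/210930_algospot_POTION.py | get_r_gcd
-- ===== SOURCE A (Python) =====
-- def get_gcd(p, q):
--     if q == 0:
--         return p
--     return get_gcd(q, p % q)
--
-- def get_r_gcd(r_list):
--     for i in range(1000, 0, -1):
--         flag = 1
--         for r in r_list:
--             if get_gcd(i, r) != i:
--                 flag = 0
--                 break
--         if flag:
--             return i
-- ===== SOURCE B (Python) =====
-- def get_r_gcd(r_list):
--     g = 0
--     for r in r_list:
--         while r:
--             g, r = r, g % r
--     for i in range(1000, 0, -1):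
--         if g % i == 0:
--             return i
-- ===== Notes on version B (the rewrite author's own statement) =====
-- stated objective: alternative
-- what changed: Instead of testing every i from 1000 down with a fresh recursive-gcd pass over the whole list, B folds one iterative Euclid over the list to get its gcd g once and then returns the first i from 1000 down with g % i == 0 (O(n log M + 1000) work instead of O(1000 n log M), though a timing run's large inputs fall outside Pre_); Pre_ excludes lists containing a negative element, on which A falls off every iteration and returns None (not an int).
-- outside the precondition, e.g. on get_r_gcd([-3]): A returns None, B returns 3
import Mathlib
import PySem

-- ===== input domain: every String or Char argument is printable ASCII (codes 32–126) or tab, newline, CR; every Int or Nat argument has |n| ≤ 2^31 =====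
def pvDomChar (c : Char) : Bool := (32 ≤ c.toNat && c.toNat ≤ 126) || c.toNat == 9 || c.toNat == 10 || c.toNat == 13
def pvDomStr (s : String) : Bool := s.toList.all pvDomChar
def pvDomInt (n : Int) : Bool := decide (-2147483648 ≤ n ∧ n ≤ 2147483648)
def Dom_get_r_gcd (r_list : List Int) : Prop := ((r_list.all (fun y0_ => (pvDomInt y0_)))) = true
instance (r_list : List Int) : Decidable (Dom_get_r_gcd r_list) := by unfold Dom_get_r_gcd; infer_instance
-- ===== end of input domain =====

-- B computes the gcd of the list once (iterative Euclid fold) and then scans 1000..1 once for the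
-- first divisor, instead of A's per-candidate gcd pass over the whole list.

-- termination lemma for the Euclid recursions (cited by name in decreasing_by)
theorem pvModNatAbsLt (p q : Int) (h : ¬ q = 0) : (PySem.Int.mod p q).natAbs < q.natAbs := by
  rcases lt_or_gt_of_ne h with hq | hq
  · have h1 := (PySem.Int.mod_neg_bounds p hq).1
    have h2 := (PySem.Int.mod_neg_bounds p hq).2
    omega
  · have h1 := PySem.Int.mod_nonneg p hq
    have h2 := PySem.Int.mod_lt p hq
    omega

-- ===== PORT A =====
def get_gcd (p q : Int) : Int :=
  if h : q = 0 then p else get_gcd q (PySem.Int.mod p q)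
termination_by q.natAbs
decreasing_by exact pvModNatAbsLt p q h

-- inner 'for r in r_list' loop with the flag/break: true = flag stayed 1
def aInner (i : Int) : List Int → Bool
  | [] => true
  | r :: rest => if get_gcd i r ≠ i then false else aInner i rest

-- outer 'for i in range(1000, 0, -1)' loop; 0 stands for Python's falling off (None), unreachable under Pre_
def aLoop (r_list : List Int) : List Int → Int
  | [] => 0
  | i :: is => if aInner i r_list then i else aLoop r_list is

def get_r_gcd (r_list : List Int) : Int := aLoop r_list (PySem.List.pyRange 1000 0 (-1))

-- ===== PORT B =====
-- 'while r: g, r = r, g % r'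
def euclidStep (g r : Int) : Int :=
  if h : r = 0 then g else euclidStep r (PySem.Int.mod g r)
termination_by r.natAbs
decreasing_by exact pvModNatAbsLt g r h

-- 'for i in range(1000, 0, -1): if g % i == 0: return i'; 0 = falling off, unreachable under Pre_
def bLoop (g : Int) : List Int → Int
  | [] => 0
  | i :: is => if PySem.Int.mod g i = 0 then i else bLoop g is

def get_r_gcd_alt (r_list : List Int) : Int :=
  bLoop (r_list.foldl euclidStep 0) (PySem.List.pyRange 1000 0 (-1))

-- ===== PRECONDITION & SPEC =====
-- Pre_ excludes lists containing a negative element: there A's divisibility test fails for every i,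
-- the loop falls off and A returns None, which is not an int value.
def Pre_get_r_gcd (r_list : List Int) : Prop := ∀ r ∈ r_list, 0 ≤ r
instance (r_list : List Int) : Decidable (Pre_get_r_gcd r_list) := by unfold Pre_get_r_gcd; infer_instance

def pvWitness_get_r_gcd : List Int := [6, 4]

def Spec_get_r_gcd (r_list : List Int) (out : Int) : Prop := out = get_r_gcd_alt r_list
instance (r_list : List Int) (out : Int) : Decidable (Spec_get_r_gcd r_list out) := by unfold Spec_get_r_gcd; infer_instance

-- ===== CLAIM (what is proved, stated in full; the proofs are below) =====
def Claim_equal_get_r_gcd : Prop := ∀ (r_list : List Int), Dom_get_r_gcd r_list → Pre_get_r_gcd r_list → Spec_get_r_gcd r_list (get_r_gcd r_list)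

-- ===== LEMMAS AND PROOFS =====

-- A's recursive gcd computes the mathematical gcd on nonnegative arguments
theorem get_gcd_eq (p q : Int) (hp : 0 ≤ p) (hq : 0 ≤ q) : get_gcd p q = ↑(Int.gcd p q) := by
  induction p, q using get_gcd.induct with
  | case1 p => rw [get_gcd]; simp [Int.gcd, Int.natAbs_of_nonneg hp]
  | case2 p q h ih =>
    have hq' : 0 < q := lt_of_le_of_ne hq (Ne.symm h)
    rw [get_gcd, dif_neg h, ih hq (PySem.Int.mod_nonneg p hq'),
        PySem.Int.mod_eq_emod_of_pos (a := p) hq', Int.gcd_comm, Int.gcd_emod p q]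

-- B's iterative Euclid computes the same mathematical gcd on nonnegative arguments
theorem euclidStep_eq (g r : Int) (hg : 0 ≤ g) (hr : 0 ≤ r) : euclidStep g r = ↑(Int.gcd g r) := by
  induction g, r using euclidStep.induct with
  | case1 g => rw [euclidStep]; simp [Int.gcd, Int.natAbs_of_nonneg hg]
  | case2 g r h ih =>
    have hr' : 0 < r := lt_of_le_of_ne hr (Ne.symm h)
    rw [euclidStep, dif_neg h, ih hr (PySem.Int.mod_nonneg g hr'),
        PySem.Int.mod_eq_emod_of_pos (a := g) hr', Int.gcd_comm, Int.gcd_emod g r]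

theorem pv_dvd_gcd_iff (i a b : Int) : i ∣ ↑(Int.gcd a b) ↔ i ∣ a ∧ i ∣ b :=
  Int.dvd_coe_gcd_iff

-- divisor characterisation of the fold: i divides the fold iff it divides acc and every element
theorem fold_dvd (rs : List Int) (acc : Int) (hacc : 0 ≤ acc) (hrs : ∀ r ∈ rs, 0 ≤ r) (i : Int) :
    i ∣ rs.foldl euclidStep acc ↔ i ∣ acc ∧ ∀ r ∈ rs, i ∣ r := by
  induction rs generalizing acc with
  | nil => simp
  | cons r rs ih =>
    have hr := hrs r List.mem_cons_self
    rw [List.foldl_cons,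
        ih _ (by rw [euclidStep_eq acc r hacc hr]; exact Int.natCast_nonneg _)
          (fun x hx => hrs x (List.mem_cons_of_mem r hx)),
        euclidStep_eq acc r hacc hr, pv_dvd_gcd_iff, List.forall_mem_cons]
    tauto

-- for 0 < i and 0 ≤ r, A's test 'get_gcd(i, r) == i' is divisibility
theorem gcd_test (i r : Int) (hi : 0 < i) (hr : 0 ≤ r) : get_gcd i r = i ↔ i ∣ r := by
  rw [get_gcd_eq i r hi.le hr]
  constructor
  · intro h; rw [← h]; exact Int.gcd_dvd_right i r
  · intro h; rw [Int.gcd_eq_natAbs_left h, Int.natAbs_of_nonneg hi.le]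

-- A's inner loop is the all-elements divisibility test
theorem aInner_iff (i : Int) (rs : List Int) (hi : 0 < i) (hrs : ∀ r ∈ rs, 0 ≤ r) :
    aInner i rs = true ↔ ∀ r ∈ rs, i ∣ r := by
  induction rs with
  | nil => simp [aInner]
  | cons r rs ih =>
    have hr := hrs r List.mem_cons_self
    have htest := gcd_test i r hi hr
    have ih' := ih (fun x hx => hrs x (List.mem_cons_of_mem r hx))
    by_cases hc : get_gcd i r = i
    · simp [aInner, hc, ih', htest.mp hc]
    · simp only [aInner, if_pos, ne_eq, hc, not_false_eq_true, List.forall_mem_cons]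
      exact ⟨fun hh => absurd hh (by simp), fun hh => absurd (htest.mpr hh.1) hc⟩

-- the two scans agree element by element, hence as loops
theorem loops_eq (rs : List Int) (g : Int) (L : List Int)
    (h : ∀ i ∈ L, (aInner i rs = true ↔ PySem.Int.mod g i = 0)) :
    aLoop rs L = bLoop g L := by
  induction L with
  | nil => rfl
  | cons i is ih =>
    have hi := h i List.mem_cons_self
    have ih' := ih (fun x hx => h x (List.mem_cons_of_mem i hx))
    by_cases ha : aInner i rs = true
    · simp [aLoop, bLoop, ha, hi.mp ha]
    · have hb : ¬ PySem.Int.mod g i = 0 := fun hm => ha (hi.mpr hm)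
      simp [aLoop, bLoop, ha, hb, ih']

-- ===== VERDICT (by name: the statement is the Claim_ definition above) =====
theorem get_r_gcd_spec : Claim_equal_get_r_gcd := by
  intro rs _ hpre
  unfold Spec_get_r_gcd get_r_gcd get_r_gcd_alt
  apply loops_eq
  intro i hiL
  rw [PySem.List.mem_pyRange_neg_one] at hiL
  have hi0 : 0 < i := hiL.1
  rw [aInner_iff i rs hi0 hpre, PySem.Int.mod_eq_zero_iff_dvd,
      fold_dvd rs 0 le_rfl hpre i]
  simp
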